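-- pv_equiv track=rewrite | github.com/wradstok/advent_of_code | 2020/day10/solution.py | calc_power
-- ===== SOURCE A (Python) =====
-- from typing import Dict, List, Tuple
--
-- def calc_power(curr_power: int, differences: List, adapters: List) -> Tuple[int, List]:
--     next_power = adapters.pop()
--     diff = next_power - curr_power
--
--     # Difference is too great
--     if diff > 3:
--         return curr_power + 3, differences
--
--     differences.append(diff)
--
--     # Out of adapters
--     if len(adapters) == 0:
--         return curr_power + 3, differences
--
--     return calc_power(next_power, differences, adapters)
-- ===== SOURCE B (Python) =====
-- # B: instead of a step-by-step recursion that pops one adapter at a time, build the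
-- # whole reversed chain up front, compute all consecutive differences in one
-- # comprehension, locate the first gap > 3, and slice.  Return value matches A;
-- # side effects differ: A empties a suffix of `adapters` in place, B leaves it intact
-- # (both append the same elements to `differences`).
-- def calc_power(curr_power, differences, adapters):
--     chain = [curr_power] + adapters[::-1]
--     diffs = [b - a for a, b in zip(chain, chain[1:])]
--     cut = len(diffs)
--     for i, d in enumerate(diffs):
--         if d > 3:
--             cut = i
--             break
--     differences.extend(diffs[:cut])
--     if cut < len(diffs):
--         return chain[cut] + 3, differences
--     return chain[-2] + 3, differences
-- ===== Notes on version B (the rewrite author's own statement) =====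
-- stated objective: alternative
-- what changed: The pop-one-adapter-per-step tail recursion is replaced by building the reversed chain once, computing all consecutive differences in a single comprehension, finding the first gap > 3 and slicing; A's in-place popping of adapters disappears (return value identical, differences mutated identically).
import Mathlib
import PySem

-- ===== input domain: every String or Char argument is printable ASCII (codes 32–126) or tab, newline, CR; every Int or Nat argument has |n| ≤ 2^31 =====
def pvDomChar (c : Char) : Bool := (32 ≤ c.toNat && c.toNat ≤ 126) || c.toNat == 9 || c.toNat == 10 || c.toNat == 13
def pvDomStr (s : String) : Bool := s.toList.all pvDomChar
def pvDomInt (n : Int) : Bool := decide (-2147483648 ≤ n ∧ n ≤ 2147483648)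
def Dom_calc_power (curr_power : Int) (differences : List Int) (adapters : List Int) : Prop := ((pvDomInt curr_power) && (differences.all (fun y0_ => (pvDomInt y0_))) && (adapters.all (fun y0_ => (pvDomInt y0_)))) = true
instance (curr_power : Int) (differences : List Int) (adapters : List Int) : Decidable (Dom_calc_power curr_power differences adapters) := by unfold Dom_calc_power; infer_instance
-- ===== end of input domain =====

-- B replaces A's pop-per-step tail recursion by computing all consecutive differences of the
-- reversed chain at once and cutting at the first gap > 3; equivalence is about the RETURN
-- value only (A empties a suffix of `adapters` in place, B does not; both append the same
-- elements to `differences`).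

-- ===== PORT A =====
def calc_power (curr_power : Int) (differences : List Int) (adapters : List Int) : Int × List Int :=
  match h : PySem.List.pop? adapters with
  | none => (curr_power, differences)  -- Python raises IndexError here; excluded by Pre_
  | some (next_power, rest) =>
    let diff := next_power - curr_power
    if diff > 3 then (curr_power + 3, differences)
    else
      let differences := differences ++ [diff]
      if rest.length = 0 then (curr_power + 3, differences)
      else calc_power next_power differences rest
termination_by adapters.length
decreasing_by
  have := PySem.List.length_of_pop?_eq_some adapters h
  simp at this ⊢
  omega

-- ===== PORT B =====
-- first index of an element > 3, or the length if none (the for/break loop of Source B)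
def pvFindCut : List Int → Nat
  | [] => 0
  | d :: t => if d > 3 then 0 else pvFindCut t + 1

def calc_power_alt (curr_power : Int) (differences : List Int) (adapters : List Int) : Int × List Int :=
  let chain := curr_power :: adapters.reverse
  let ds := List.zipWith (fun a b => b - a) chain chain.tail
  let cut := pvFindCut ds
  let differences := differences ++ ds.take cut
  if cut < ds.length then (chain.getD cut 0 + 3, differences)
  else (chain.getD (chain.length - 2) 0 + 3, differences)

-- ===== PRECONDITION & SPEC =====
-- Python A raises IndexError (pop from empty list) iff adapters is empty; Pre_ excludes exactly that.
def Pre_calc_power (curr_power : Int) (differences : List Int) (adapters : List Int) : Prop := adapters ≠ []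
instance (curr_power : Int) (differences : List Int) (adapters : List Int) : Decidable (Pre_calc_power curr_power differences adapters) := by unfold Pre_calc_power; infer_instance
def pvWitness_calc_power : Int × List Int × List Int := (0, [1], [9, 6, 3])

def Spec_calc_power (curr_power : Int) (differences : List Int) (adapters : List Int) (out : Int × List Int) : Prop := out = calc_power_alt curr_power differences adapters
instance (curr_power : Int) (differences : List Int) (adapters : List Int) (out : Int × List Int) : Decidable (Spec_calc_power curr_power differences adapters out) := by unfold Spec_calc_power; infer_instance

-- ===== CLAIM (what is proved, stated in full; the proofs are below) =====
def Claim_equal_calc_power : Prop := ∀ (curr_power : Int) (differences : List Int) (adapters : List Int), Dom_calc_power curr_power differences adapters → Pre_calc_power curr_power differences adapters → Spec_calc_power curr_power differences adapters (calc_power curr_power differences adapters)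

-- ===== LEMMAS AND PROOFS =====

-- A's recursion, rephrased over the reversed adapter list (front-to-back).
def pvGo (c : Int) (ds : List Int) : List Int → Int × List Int
  | [] => (c, ds)
  | a :: rest =>
    if a - c > 3 then (c + 3, ds)
    else if rest = [] then (c + 3, ds ++ [a - c])
    else pvGo a (ds ++ [a - c]) rest

-- B's computation with the reversed adapter list made explicit.
def pvAltCore (c : Int) (ds0 : List Int) (r : List Int) : Int × List Int :=
  let chain := c :: r
  let ds := List.zipWith (fun a b => b - a) chain chain.tail
  let cut := pvFindCut ds
  let differences := ds0 ++ ds.take cut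
  if cut < ds.length then (chain.getD cut 0 + 3, differences)
  else (chain.getD (chain.length - 2) 0 + 3, differences)

theorem pvAlt_eq_core (c : Int) (ds : List Int) (l : List Int) :
    calc_power_alt c ds l = pvAltCore c ds l.reverse := rfl

theorem pvA_eq_go (r : List Int) : ∀ (c : Int) (ds : List Int),
    calc_power c ds r.reverse = pvGo c ds r := by
  induction r with
  | nil => intro c ds; rw [pvGo]; unfold calc_power; rfl
  | cons a rest ih =>
    intro c ds
    rw [pvGo]
    unfold calc_power
    rw [List.reverse_cons, PySem.List.pop?_last]
    by_cases hgt : a - c > 3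
    · simp [hgt]
    · by_cases hr : rest = []
      · simp [hgt, hr]
      · have hlen : rest.reverse.length ≠ 0 := by simp [hr]
        simp only [hgt, if_false, hlen]
        simp [hr, ih]

theorem pvAltCore_cons (c a : Int) (ds : List Int) (r : List Int)
    (h3 : ¬ a - c > 3) (hr : r ≠ []) :
    pvAltCore c ds (a :: r) = pvAltCore a (ds ++ [a - c]) r := by
  cases r with
  | nil => exact absurd rfl hr
  | cons b t =>
    simp only [pvAltCore, List.tail_cons, List.zipWith_cons_cons, pvFindCut, if_neg h3,
      List.length_cons, List.take_succ_cons, List.append_assoc, List.singleton_append,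
      List.getD_cons_succ]
    split_ifs <;> first | rfl | omega

theorem pvGo_eq_core (r : List Int) : r ≠ [] → ∀ (c : Int) (ds : List Int),
    pvGo c ds r = pvAltCore c ds r := by
  induction r with
  | nil => intro h; exact absurd rfl h
  | cons a rest ih =>
    intro _ c ds
    rw [pvGo]
    by_cases hgt : a - c > 3
    · simp [pvAltCore, pvFindCut, hgt]
    · by_cases hr : rest = []
      · subst hr; simp [pvAltCore, pvFindCut, hgt]
      · rw [if_neg hgt, if_neg hr, ih hr a (ds ++ [a - c]), ← pvAltCore_cons c a ds rest hgt hr]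

-- ===== VERDICT (by name: the statement is the Claim_ definition above) =====
theorem calc_power_spec : Claim_equal_calc_power := by
  unfold Claim_equal_calc_power
  intro c ds l _ hpre
  unfold Spec_calc_power Pre_calc_power at *
  rw [pvAlt_eq_core, ← pvGo_eq_core l.reverse (by simpa using hpre)]
  rw [← pvA_eq_go l.reverse c ds, List.reverse_reverse]
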